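-- pv_equiv track=rewrite | github.com/BittyTax/BittyTax | src/bittytax/conv/parsers/kraken.py | _normalise_asset
-- ===== SOURCE A (Python) =====
-- ALT_ASSETS = {
--     "KFEE": "FEE",
--     "XETC": "ETC",
--     "XETH": "ETH",
--     "XLTC": "LTC",
--     "XMLN": "MLN",
--     "XREP": "REP",
--     "XXBT": "XBT",
--     "XXDG": "XDG",
--     "XXLM": "XLM",
--     "XXMR": "XMR",
--     "XXRP": "XRP",
--     "XZEC": "ZEC",
--     "ZARS": "ARS",
--     "ZAUD": "AUD",
--     "ZCAD": "CAD",
--     "ZEUR": "EUR",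
--     "ZGBP": "GBP",
--     "ZJPY": "JPY",
--     "ZMXN": "MXN",
--     "ZUSD": "USD",
-- }
--
-- STAKED_SUFFIX = [
--     ".HOLD",
--     ".M",
--     ".P",
--     ".S",
--     "03.S",
--     "04.S",
--     "07.S",
--     "14.S",
--     "21.S",
--     "28.S",
-- ]
--
-- def _normalise_asset(asset: str) -> str:
--     asset = ALT_ASSETS.get(asset, asset)
--
--     if asset == "XBT":
--         return "BTC"
--
--     for suffix in sorted(STAKED_SUFFIX, reverse=True):
--         if asset.endswith(suffix):
--             return asset[: -len(suffix)]
--     return asset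
-- ===== SOURCE B (Python) =====
-- ALT_ASSETS = {
--     "KFEE": "FEE",
--     "XETC": "ETC",
--     "XETH": "ETH",
--     "XLTC": "LTC",
--     "XMLN": "MLN",
--     "XREP": "REP",
--     "XXBT": "XBT",
--     "XXDG": "XDG",
--     "XXLM": "XLM",
--     "XXMR": "XMR",
--     "XXRP": "XRP",
--     "XZEC": "ZEC",
--     "ZARS": "ARS",
--     "ZAUD": "AUD",
--     "ZCAD": "CAD",
--     "ZEUR": "EUR",
--     "ZGBP": "GBP",
--     "ZJPY": "JPY",
--     "ZMXN": "MXN",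
--     "ZUSD": "USD",
-- }
--
-- _NUM_PREFIXES = ("03", "04", "07", "14", "21", "28")
--
--
-- def _normalise_asset(asset: str) -> str:
--     asset = ALT_ASSETS.get(asset, asset)
--
--     if asset == "XBT":
--         return "BTC"
--
--     i = asset.rfind(".")
--     if i < 0:
--         return asset
--     tail = asset[i + 1:]
--     if tail in ("HOLD", "M", "P"):
--         return asset[:i]
--     if tail == "S":
--         if asset[max(i - 2, 0):i] in _NUM_PREFIXES:
--             return asset[:i - 2]
--         return asset[:i]
--     return asset
-- ===== Notes on version B (the rewrite author's own statement) =====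
-- stated objective: alternative
-- what changed: A re-sorts the staking-suffix list and scans it with endswith; B instead takes one rfind for the last dot and a case analysis on the tail after it (HOLD/M/P/S plus a two-char numeric prefix check), with no suffix list and no per-suffix scan.
import Mathlib
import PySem

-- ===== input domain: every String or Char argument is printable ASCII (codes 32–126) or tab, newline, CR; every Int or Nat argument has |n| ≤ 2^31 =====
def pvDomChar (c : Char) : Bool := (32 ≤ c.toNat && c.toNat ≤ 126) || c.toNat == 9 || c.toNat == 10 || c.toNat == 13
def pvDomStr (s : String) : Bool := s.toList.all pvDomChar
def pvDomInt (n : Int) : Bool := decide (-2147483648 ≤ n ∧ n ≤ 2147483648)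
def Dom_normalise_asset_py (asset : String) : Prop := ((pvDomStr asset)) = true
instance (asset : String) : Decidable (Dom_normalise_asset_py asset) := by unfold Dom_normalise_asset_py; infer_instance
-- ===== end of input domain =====

-- B replaces A's scan over the reverse-sorted staking-suffix list by a single rfind('.') and a case analysis on the tail after the last dot (alternative decomposition, similar cost).


-- ===== PORT A =====
def pvAltAssets : PySem.Dict String String :=
  PySem.Dict.ofList [("KFEE", "FEE"), ("XETC", "ETC"), ("XETH", "ETH"), ("XLTC", "LTC"),
    ("XMLN", "MLN"), ("XREP", "REP"), ("XXBT", "XBT"), ("XXDG", "XDG"), ("XXLM", "XLM"),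
    ("XXMR", "XMR"), ("XXRP", "XRP"), ("XZEC", "ZEC"), ("ZARS", "ARS"), ("ZAUD", "AUD"),
    ("ZCAD", "CAD"), ("ZEUR", "EUR"), ("ZGBP", "GBP"), ("ZJPY", "JPY"), ("ZMXN", "MXN"),
    ("ZUSD", "USD")]

def pvStakedSuffix : List String :=
  [".HOLD", ".M", ".P", ".S", "03.S", "04.S", "07.S", "14.S", "21.S", "28.S"]

-- the loop 'for suffix in sorted(STAKED_SUFFIX, reverse=True): if asset.endswith(suffix): return asset[:-len(suffix)]'
def pvStripLoop : List String → String → String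
  | [], asset => asset
  | sfx :: rest, asset =>
    if PySem.Str.endswith asset sfx then
      PySem.Str.slice asset none (some (-(PySem.Str.len sfx)))
    else pvStripLoop rest asset

def normalise_asset_py (asset : String) : String :=
  let asset := pvAltAssets.getD asset asset
  if asset == "XBT" then "BTC"
  else pvStripLoop (PySem.List.sorted pvStakedSuffix (fun s => s) true) asset

-- ===== PORT B =====
def pvNumPrefixes : List String := ["03", "04", "07", "14", "21", "28"]

def normalise_asset_py_alt (asset : String) : String :=
  let asset := pvAltAssets.getD asset asset
  if asset == "XBT" then "BTC"
  else
    let i := PySem.Str.rfind asset "."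
    if i < 0 then asset
    else
      let tail := PySem.Str.slice asset (some (i + 1)) none
      if tail == "HOLD" || tail == "M" || tail == "P" then
        PySem.Str.slice asset none (some i)
      else if tail == "S" then
        if pvNumPrefixes.contains (PySem.Str.slice asset (some (max (i - 2) 0)) (some i)) then
          PySem.Str.slice asset none (some (i - 2))
        else PySem.Str.slice asset none (some i)
      else asset

-- ===== PRECONDITION & SPEC =====
def Spec_normalise_asset_py (asset : String) (out : String) : Prop := out = normalise_asset_py_alt asset
instance (asset : String) (out : String) : Decidable (Spec_normalise_asset_py asset out) := by unfold Spec_normalise_asset_py; infer_instance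

-- ===== CLAIM (what is proved, stated in full; the proofs are below) =====
def Claim_equal_normalise_asset_py : Prop := ∀ (asset : String), Dom_normalise_asset_py asset → Spec_normalise_asset_py asset (normalise_asset_py asset)

-- ===== LEMMAS AND PROOFS =====

lemma pv_sorted_eval :
    PySem.List.sorted pvStakedSuffix (fun s => s) true =
      ["28.S", "21.S", "14.S", "07.S", "04.S", "03.S", ".S", ".P", ".M", ".HOLD"] := by
  apply PySem.List.sorted_rev_eq_of_perm_of_pairwise_gt
  · decide
  · haveI : Trans (fun a b : String => b < a) (fun a b : String => b < a) (fun a b : String => b < a) :=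
      ⟨fun h1 h2 => lt_trans h2 h1⟩
    apply List.IsChain.pairwise
    simp only [List.isChain_cons_cons, List.isChain_singleton, and_true]
    exact ⟨compare_gt_iff_gt.mp rfl, compare_gt_iff_gt.mp rfl, compare_gt_iff_gt.mp rfl,
      compare_gt_iff_gt.mp rfl, compare_gt_iff_gt.mp rfl, compare_gt_iff_gt.mp rfl,
      compare_gt_iff_gt.mp rfl, compare_gt_iff_gt.mp rfl, compare_gt_iff_gt.mp rfl⟩

lemma pv_head_prefix (c : Char) (t : List Char) : [c] <+: t ↔ t.head? = some c := by
  cases t <;> simp [eq_comm]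

lemma pv_go_eq_neg_one (l : List Char) (c : Char) (k : Nat)
    (h : ∀ j, j ≤ k → l[j]? ≠ some c) : PySem.Chars.rfind.go l [c] k = -1 := by
  induction k with
  | zero =>
    rw [PySem.Chars.rfind.go]
    simp [pv_head_prefix, List.head?_eq_getElem?, h 0 le_rfl]
  | succ j ih =>
    rw [PySem.Chars.rfind.go]
    have hj : ¬([c].isPrefixOf (l.drop (j + 1)) = true) := by
      simp [pv_head_prefix, List.head?_drop, h (j + 1) le_rfl]
    rw [if_neg hj]
    exact ih fun j' hj' => h j' (hj'.trans (Nat.le_succ _))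

lemma pv_go_eq (l : List Char) (c : Char) (k m : Nat) (hm : m ≤ k) (hc : l[m]? = some c)
    (h : ∀ j, m < j → j ≤ k → l[j]? ≠ some c) : PySem.Chars.rfind.go l [c] k = m := by
  induction k with
  | zero =>
    interval_cases m
    rw [PySem.Chars.rfind.go]
    simp [pv_head_prefix, List.head?_eq_getElem?, hc]
  | succ j ih =>
    rw [PySem.Chars.rfind.go]
    by_cases hmj : m = j + 1
    · subst hmj
      rw [if_pos (by simp [pv_head_prefix, List.head?_drop, hc])]
    · have hmle : m ≤ j := by omega
      have hj : ¬([c].isPrefixOf (l.drop (j + 1)) = true) := by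
        simp [pv_head_prefix, List.head?_drop, h (j + 1) (by omega) le_rfl]
      rw [if_neg hj]
      exact ih hmle fun j' h1 h2 => h j' h1 (h2.trans (Nat.le_succ _))

lemma pv_rfind_last (u v : List Char) (hv : '.' ∉ v) :
    PySem.Chars.rfind (u ++ '.' :: v) ['.'] = u.length := by
  show PySem.Chars.rfind.go _ _ _ = _
  apply pv_go_eq
  · simp
  · rw [List.getElem?_append_right le_rfl]
    simp
  · intro j hj hjk heq
    rw [List.getElem?_append_right (by omega)] at heq
    obtain ⟨d, hd⟩ : ∃ d, j - u.length = d + 1 := ⟨j - u.length - 1, by omega⟩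
    rw [hd, List.getElem?_cons_succ] at heq
    exact hv (List.mem_of_getElem? heq)

lemma pv_rfind_none (l : List Char) (h : '.' ∉ l) : PySem.Chars.rfind l ['.'] = -1 := by
  apply pv_go_eq_neg_one
  intro j _ heq
  exact h (List.mem_of_getElem? heq)

lemma pv_prefix_dot_iff {x : Char} : ∀ {q u : List Char} (w v : List Char), x ∉ q → x ∉ u →
    ((q ++ x :: w) <+: (u ++ x :: v) ↔ q = u ∧ w <+: v) := by
  intro q
  induction q with
  | nil =>
    intro u w v _ hu
    cases u with
    | nil => simp
    | cons y ys =>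
      simp only [List.nil_append, List.cons_append, List.cons_prefix_cons]
      constructor
      · rintro ⟨rfl, -⟩; exact absurd (List.mem_cons_self) hu
      · rintro ⟨h, -⟩; exact absurd h.symm (by simp)
  | cons z zs ih =>
    intro u w v hq hu
    cases u with
    | nil =>
      simp only [List.cons_append, List.nil_append, List.cons_prefix_cons]
      constructor
      · rintro ⟨rfl, -⟩; exact absurd (List.mem_cons_self) hq
      · rintro ⟨h, -⟩; exact absurd h (by simp)
    | cons y ys =>
      simp only [List.cons_append, List.cons_prefix_cons]
      rw [ih w v (fun h => hq (List.mem_cons_of_mem _ h)) (fun h => hu (List.mem_cons_of_mem _ h))]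
      constructor
      · rintro ⟨rfl, rfl, h⟩; exact ⟨rfl, h⟩
      · rintro ⟨h, hwv⟩; cases h; exact ⟨rfl, rfl, hwv⟩

lemma pv_suffix_dot_iff {x : Char} {q u : List Char} (w v : List Char) (hw : x ∉ w) (hv : x ∉ v) :
    ((q ++ x :: w) <:+ (u ++ x :: v) ↔ w = v ∧ q <:+ u) := by
  rw [← List.reverse_prefix]
  have h1 : (q ++ x :: w).reverse = w.reverse ++ x :: q.reverse := by simp
  have h2 : (u ++ x :: v).reverse = v.reverse ++ x :: u.reverse := by simp
  rw [h1, h2, pv_prefix_dot_iff q.reverse u.reverse (by simpa using hw) (by simpa using hv)]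
  constructor
  · rintro ⟨h, hp⟩
    exact ⟨by simpa using congrArg List.reverse h, by rwa [List.reverse_prefix] at hp⟩
  · rintro ⟨rfl, hp⟩
    exact ⟨rfl, by rwa [List.reverse_prefix]⟩

lemma pv_endswith_decomp (u v q w : List Char) (hw : '.' ∉ w) (hv : '.' ∉ v) :
    PySem.Chars.endswith (u ++ '.' :: v) (q ++ '.' :: w) =
      (decide (w = v) && PySem.Chars.endswith u q) := by
  rw [Bool.eq_iff_iff]
  simp only [Bool.and_eq_true, decide_eq_true_eq, PySem.Chars.endswith_iff]
  exact pv_suffix_dot_iff w v hw hv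

lemma pv_endswith_no_dot (l p : List Char) (hl : '.' ∉ l) (hp : '.' ∈ p) :
    PySem.Chars.endswith l p = false := by
  rw [← Bool.not_eq_true]
  intro h
  exact hl ((PySem.Chars.endswith_iff l p |>.mp h).subset hp)

lemma pv_last_dot (l : List Char) (h : '.' ∈ l) : ∃ u v, l = u ++ '.' :: v ∧ '.' ∉ v := by
  induction l with
  | nil => cases h
  | cons x xs ih =>
    by_cases hx : '.' ∈ xs
    · obtain ⟨u, v, rfl, hv⟩ := ih hx
      exact ⟨x :: u, v, rfl, hv⟩
    · have hxd : x = '.' := by rcases List.mem_cons.mp h with h | h; exact h.symm; exact absurd h hx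
      exact ⟨[], xs, by rw [hxd]; rfl, hx⟩

lemma pv_endswith_nil (u : List Char) : PySem.Chars.endswith u [] = true := by
  simp [PySem.Chars.endswith]

lemma pv_endswith_pair (u : List Char) (c d : Char) :
    PySem.Chars.endswith u [c, d] = decide (u.drop (u.length - 2) = [c, d]) := by
  rw [Bool.eq_iff_iff]
  simp only [PySem.Chars.endswith_iff, decide_eq_true_eq]
  rw [List.suffix_iff_eq_drop]
  constructor
  · intro h; exact h.symm
  · intro h; exact h.symm

lemma pv_ofList_beq (v w : List Char) : (String.ofList v == String.ofList w) = decide (v = w) := by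
  rw [Bool.eq_iff_iff]; simp [String.ofList_inj]

set_option maxHeartbeats 1000000 in
lemma pv_core (a : String) :
    pvStripLoop ["28.S", "21.S", "14.S", "07.S", "04.S", "03.S", ".S", ".P", ".M", ".HOLD"] a =
      (let i := PySem.Str.rfind a "."
       if i < 0 then a
       else
         let tail := PySem.Str.slice a (some (i + 1)) none
         if tail == "HOLD" || tail == "M" || tail == "P" then PySem.Str.slice a none (some i)
         else if tail == "S" then
           if pvNumPrefixes.contains (PySem.Str.slice a (some (max (i - 2) 0)) (some i)) then
             PySem.Str.slice a none (some (i - 2))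
           else PySem.Str.slice a none (some i)
         else a) := by
  simp only [pvStripLoop]
  rw [PySem.Str.rfind_eq, show (".".toList) = ['.'] from by decide]
  simp only [PySem.Str.endswith_eq,
    show ("28.S".toList) = ['2','8'] ++ '.' :: ['S'] from by decide,
    show ("21.S".toList) = ['2','1'] ++ '.' :: ['S'] from by decide,
    show ("14.S".toList) = ['1','4'] ++ '.' :: ['S'] from by decide,
    show ("07.S".toList) = ['0','7'] ++ '.' :: ['S'] from by decide,
    show ("04.S".toList) = ['0','4'] ++ '.' :: ['S'] from by decide,
    show ("03.S".toList) = ['0','3'] ++ '.' :: ['S'] from by decide,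
    show (".S".toList) = [] ++ '.' :: ['S'] from by decide,
    show (".P".toList) = [] ++ '.' :: ['P'] from by decide,
    show (".M".toList) = [] ++ '.' :: ['M'] from by decide,
    show (".HOLD".toList) = [] ++ '.' :: ['H','O','L','D'] from by decide]
  by_cases hdot : '.' ∈ a.toList
  · obtain ⟨u, v, hl, hv⟩ := pv_last_dot _ hdot
    have ha : a = String.ofList (u ++ '.' :: v) := by rw [← hl, String.ofList_toList]
    rw [ha]
    simp only [String.toList_ofList]
    rw [pv_rfind_last u v hv]
    rw [pv_endswith_decomp u v ['2','8'] ['S'] (by decide) hv,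
        pv_endswith_decomp u v ['2','1'] ['S'] (by decide) hv,
        pv_endswith_decomp u v ['1','4'] ['S'] (by decide) hv,
        pv_endswith_decomp u v ['0','7'] ['S'] (by decide) hv,
        pv_endswith_decomp u v ['0','4'] ['S'] (by decide) hv,
        pv_endswith_decomp u v ['0','3'] ['S'] (by decide) hv,
        pv_endswith_decomp u v [] ['S'] (by decide) hv,
        pv_endswith_decomp u v [] ['P'] (by decide) hv,
        pv_endswith_decomp u v [] ['M'] (by decide) hv,
        pv_endswith_decomp u v [] ['H','O','L','D'] (by decide) hv]
    rw [if_neg (by omega : ¬((u.length : Int) < 0))]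
    have htail : PySem.Str.slice (String.ofList (u ++ '.' :: v)) (some ((u.length : Int) + 1)) = String.ofList v := by
      simp only [PySem.Str.slice, String.toList_ofList, PySem.Chars.slice_eq_listSlice]
      congr 1
      rw [show ((u.length : Int) + 1) = ((u.length + 1 : Nat) : Int) from by push_cast; ring]
      rw [PySem.List.slice_from_natCast]
      rw [show u ++ '.' :: v = (u ++ ['.']) ++ v from by simp]
      rw [List.drop_left' (by simp)]
    rw [htail]
    rw [show ("HOLD" : String) = String.ofList ['H','O','L','D'] from by decide,
        show ("M" : String) = String.ofList ['M'] from by decide,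
        show ("P" : String) = String.ofList ['P'] from by decide,
        show ("S" : String) = String.ofList ['S'] from by decide]
    simp only [pv_ofList_beq, pv_endswith_nil, Bool.and_true, pv_endswith_pair,
      show PySem.Str.len "28.S" = 4 from by decide, show PySem.Str.len "21.S" = 4 from by decide,
      show PySem.Str.len "14.S" = 4 from by decide, show PySem.Str.len "07.S" = 4 from by decide,
      show PySem.Str.len "04.S" = 4 from by decide, show PySem.Str.len "03.S" = 4 from by decide,
      show PySem.Str.len ".S" = 2 from by decide, show PySem.Str.len ".P" = 2 from by decide,
      show PySem.Str.len ".M" = 2 from by decide, show PySem.Str.len ".HOLD" = 5 from by decide]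
    by_cases hH : v = ['H','O','L','D']
    · subst hH
      simp only [show decide (['S'] = ['H','O','L','D']) = false from by decide,
        show decide (['P'] = ['H','O','L','D']) = false from by decide,
        show decide (['M'] = ['H','O','L','D']) = false from by decide,
        show decide (['H','O','L','D'] = ['H','O','L','D']) = true from by decide,
        show decide (['H','O','L','D'] = ['M']) = false from by decide,
        show decide (['H','O','L','D'] = ['P']) = false from by decide,
        show decide (['H','O','L','D'] = ['S']) = false from by decide,
        Bool.false_and, Bool.true_and, Bool.false_or, Bool.true_or, Bool.or_false,
        Bool.false_eq_true, if_false, if_true, decide_true]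
      simp only [PySem.Str.slice, String.toList_ofList, PySem.Chars.slice_eq_listSlice]
      congr 1
      rw [PySem.List.slice_to_neg_ofNat _ 5 (by omega), PySem.List.slice_to_natCast]
      simp
    · by_cases hM : v = ['M']
      · subst hM
        simp only [show decide (['S'] = ['M']) = false from by decide,
          show decide (['P'] = ['M']) = false from by decide,
          show decide (['M'] = ['M']) = true from by decide,
          show decide (['H','O','L','D'] = ['M']) = false from by decide,
          show decide (['M'] = ['H','O','L','D']) = false from by decide,
          show decide (['M'] = ['P']) = false from by decide,
          show decide (['M'] = ['S']) = false from by decide,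
          Bool.false_and, Bool.true_and, Bool.false_or, Bool.true_or, Bool.or_false,
          Bool.false_eq_true, if_false, if_true, decide_true]
        simp only [PySem.Str.slice, String.toList_ofList, PySem.Chars.slice_eq_listSlice]
        congr 1
        rw [PySem.List.slice_to_neg_ofNat _ 2 (by omega), PySem.List.slice_to_natCast]
        simp
      · by_cases hP : v = ['P']
        · subst hP
          simp only [show decide (['S'] = ['P']) = false from by decide,
            show decide (['P'] = ['P']) = true from by decide,
            show decide (['M'] = ['P']) = false from by decide,
            show decide (['H','O','L','D'] = ['P']) = false from by decide,
            show decide (['P'] = ['H','O','L','D']) = false from by decide,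
            show decide (['P'] = ['M']) = false from by decide,
            show decide (['P'] = ['S']) = false from by decide,
            Bool.false_and, Bool.true_and, Bool.false_or, Bool.true_or, Bool.or_false,
            Bool.false_eq_true, if_false, if_true, decide_true]
          simp only [PySem.Str.slice, String.toList_ofList, PySem.Chars.slice_eq_listSlice]
          congr 1
          rw [PySem.List.slice_to_neg_ofNat _ 2 (by omega), PySem.List.slice_to_natCast]
          simp
        · by_cases hS : v = ['S']
          · subst hS
            simp only [show decide (['S'] = ['S']) = true from by decide,
              show decide (['P'] = ['S']) = false from by decide,
              show decide (['M'] = ['S']) = false from by decide,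
              show decide (['H','O','L','D'] = ['S']) = false from by decide,
              show decide (['S'] = ['H','O','L','D']) = false from by decide,
              show decide (['S'] = ['M']) = false from by decide,
              show decide (['S'] = ['P']) = false from by decide,
              Bool.false_and, Bool.true_and, Bool.false_or, Bool.true_or, Bool.or_false,
              Bool.false_eq_true, if_false, if_true, decide_true]
            have hsl : PySem.Str.slice (String.ofList (u ++ ['.', 'S'])) (some (max ((u.length : Int) - 2) 0)) (some (u.length : Int)) = String.ofList (u.drop (u.length - 2)) := by
              simp only [PySem.Str.slice, String.toList_ofList, PySem.Chars.slice_eq_listSlice]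
              congr 1
              rw [show (max ((u.length : Int) - 2) 0) = ((u.length - 2 : Nat) : Int) from by omega]
              rw [PySem.List.slice_natCast]
              rw [List.drop_append_of_le_length (by omega)]
              rw [List.take_left' (by simp)]
            rw [hsl]
            simp only [pvNumPrefixes, List.contains_cons, List.contains_nil,
              show ("03" : String) = String.ofList ['0','3'] from by decide,
              show ("04" : String) = String.ofList ['0','4'] from by decide,
              show ("07" : String) = String.ofList ['0','7'] from by decide,
              show ("14" : String) = String.ofList ['1','4'] from by decide,
              show ("21" : String) = String.ofList ['2','1'] from by decide,
              show ("28" : String) = String.ofList ['2','8'] from by decide,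
              pv_ofList_beq, Bool.or_false]
            have hnum : ∀ w : List Char, List.drop (u.length - 2) u = w → w.length = 2 →
                PySem.Str.slice (String.ofList (u ++ ['.', 'S'])) none (some (-4)) =
                  PySem.Str.slice (String.ofList (u ++ ['.', 'S'])) none (some ((u.length : Int) - 2)) := by
              intro w hw hwl
              have hlen := congrArg List.length hw
              simp only [List.length_drop, hwl] at hlen
              simp only [PySem.Str.slice, String.toList_ofList, PySem.Chars.slice_eq_listSlice]
              congr 1
              rw [PySem.List.slice_to_neg_ofNat _ 4 (by omega)]
              rw [show ((u.length : Int) - 2) = ((u.length - 2 : Nat) : Int) from by omega,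
                PySem.List.slice_to_natCast]
              congr 1
              simp only [List.length_append, List.length_cons, List.length_nil]
              omega
            have hmiss : PySem.Str.slice (String.ofList (u ++ ['.', 'S'])) none (some (-2)) =
                PySem.Str.slice (String.ofList (u ++ ['.', 'S'])) none (some (u.length : Int)) := by
              simp only [PySem.Str.slice, String.toList_ofList, PySem.Chars.slice_eq_listSlice]
              congr 1
              rw [PySem.List.slice_to_neg_ofNat _ 2 (by omega), PySem.List.slice_to_natCast]
              simp
            simp only [decide_eq_true_eq, Bool.or_eq_true]
            by_cases h28 : List.drop (u.length - 2) u = ['2', '8']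
            · rw [if_pos h28, if_pos (Or.inr (Or.inr (Or.inr (Or.inr (Or.inr h28)))))]
              exact hnum _ h28 rfl
            rw [if_neg h28]
            by_cases h21 : List.drop (u.length - 2) u = ['2', '1']
            · rw [if_pos h21, if_pos (Or.inr (Or.inr (Or.inr (Or.inr (Or.inl h21)))))]
              exact hnum _ h21 rfl
            rw [if_neg h21]
            by_cases h14 : List.drop (u.length - 2) u = ['1', '4']
            · rw [if_pos h14, if_pos (Or.inr (Or.inr (Or.inr (Or.inl h14))))]
              exact hnum _ h14 rfl
            rw [if_neg h14]
            by_cases h07 : List.drop (u.length - 2) u = ['0', '7']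
            · rw [if_pos h07, if_pos (Or.inr (Or.inr (Or.inl h07)))]
              exact hnum _ h07 rfl
            rw [if_neg h07]
            by_cases h04 : List.drop (u.length - 2) u = ['0', '4']
            · rw [if_pos h04, if_pos (Or.inr (Or.inl h04))]
              exact hnum _ h04 rfl
            rw [if_neg h04]
            by_cases h03 : List.drop (u.length - 2) u = ['0', '3']
            · rw [if_pos h03, if_pos (Or.inl h03)]
              exact hnum _ h03 rfl
            rw [if_neg h03, if_neg (show ¬_ from fun h => h.elim h03 (fun h => h.elim h04 (fun h => h.elim h07 (fun h => h.elim h14 (fun h => h.elim h21 h28)))))]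
            exact hmiss
          · simp only [decide_eq_false (show ¬(['S'] = v) from fun h => hS h.symm),
              decide_eq_false (show ¬(['P'] = v) from fun h => hP h.symm),
              decide_eq_false (show ¬(['M'] = v) from fun h => hM h.symm),
              decide_eq_false (show ¬(['H','O','L','D'] = v) from fun h => hH h.symm),
              decide_eq_false hS, decide_eq_false hP, decide_eq_false hM, decide_eq_false hH,
              Bool.false_and, Bool.false_or, Bool.false_eq_true, if_false]

  · have hfalse : ∀ p : List Char, '.' ∈ p → PySem.Chars.endswith a.toList p = false :=
      fun p hp => pv_endswith_no_dot _ _ hdot hp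
    rw [pv_rfind_none _ hdot]
    simp [hfalse]

-- ===== VERDICT (by name: the statement is the Claim_ definition above) =====
theorem normalise_asset_py_spec : Claim_equal_normalise_asset_py := by
  intro asset _
  unfold Spec_normalise_asset_py
  simp only [normalise_asset_py, normalise_asset_py_alt]
  rw [pv_sorted_eval]
  by_cases hx : (pvAltAssets.getD asset asset == "XBT") = true
  · simp only [hx, if_true]
  · rw [Bool.not_eq_true] at hx
    simp only [hx, Bool.false_eq_true, if_false]
    exact pv_core _
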